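-- pv_equiv track=rewrite | github.com/belgiansenate/alexis-baseline | utils.py | get_summary_titles
-- ===== SOURCE A (Python) =====
-- def get_summary_titles(text, check_points):
--     counter = 0
--     contents_counter = len(check_points)
--     all_contents, content = [], []
--     text = text.split('\n')
--
--     for line in text:
--         if counter == contents_counter:
--             return all_contents
--
--         content.append(line)
--         if line in check_points:
--             # join content and add to all_contents
--
--             cont = ' '.join(content)
--             # remove '\n' from each content
--             all_contents.append(cont)
--             content = []
--             counter += 1
--     return all_contents
-- ===== SOURCE B (Python) =====
-- def get_summary_titles(text, check_points):
--     lines = text.split('\n')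
--     segments = []
--     while len(segments) < len(check_points):
--         hit = next((j for j, l in enumerate(lines) if l in check_points), None)
--         if hit is None:
--             break
--         segments.append(' '.join(lines[:hit + 1]))
--         lines = lines[hit + 1:]
--     return segments
-- ===== Notes on version B (the rewrite author's own statement) =====
-- stated objective: alternative
-- what changed: Replaced A's per-line loop with a counter and a growing content buffer by repeatedly finding the index of the first checkpoint line and splitting the line list there, emitting one joined segment per split, capped by len(check_points).
import Mathlib
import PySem

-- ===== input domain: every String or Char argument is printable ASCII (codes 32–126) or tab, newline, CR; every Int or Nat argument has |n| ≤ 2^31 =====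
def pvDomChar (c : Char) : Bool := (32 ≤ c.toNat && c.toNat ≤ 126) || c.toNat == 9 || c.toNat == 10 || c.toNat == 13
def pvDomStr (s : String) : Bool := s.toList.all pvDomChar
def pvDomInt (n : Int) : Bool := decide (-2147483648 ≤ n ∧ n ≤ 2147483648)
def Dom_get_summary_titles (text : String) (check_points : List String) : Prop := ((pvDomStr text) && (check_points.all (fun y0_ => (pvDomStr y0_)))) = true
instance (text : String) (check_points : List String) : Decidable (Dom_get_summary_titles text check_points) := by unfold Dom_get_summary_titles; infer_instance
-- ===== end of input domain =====

-- B replaces A's per-line counter/content-buffer loop by repeatedly finding the first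
-- checkpoint line and splitting the line list there (objective: alternative decomposition, same cost).

-- ===== PORT A =====
-- the for-loop of A, state = (counter, all_contents, content); early return when counter == cap
def pvALoop (cps : List String) (cap : Nat) :
    List String → Nat → List String → List String → List String
  | [], _, acc, _ => acc
  | l :: ls, c, acc, cont =>
    if c = cap then acc
    else
      if l ∈ cps then
        pvALoop cps cap ls (c + 1) (acc ++ [PySem.Str.join " " (cont ++ [l])]) []
      else
        pvALoop cps cap ls c acc (cont ++ [l])

def get_summary_titles (text : String) (check_points : List String) : List String :=
  pvALoop check_points check_points.length (((PySem.Str.split? text "\n").getD [])) 0 [] []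

-- ===== PORT B =====
-- the while-loop of B: fuel = len(check_points) - len(segments); hit = first index of a
-- checkpoint line (next(...) on the enumerate generator = List.findIdx?);
-- lines[:hit+1] / lines[hit+1:] with a nonnegative in-range bound = take / drop (exact here)
def pvBLoop (cps : List String) : Nat → List String → List String
  | 0, _ => []
  | k + 1, lines =>
    match lines.findIdx? (fun l => decide (l ∈ cps)) with
    | none => []
    | some j => PySem.Str.join " " (lines.take (j + 1)) :: pvBLoop cps k (lines.drop (j + 1))

def get_summary_titles_alt (text : String) (check_points : List String) : List String :=
  pvBLoop check_points check_points.length (((PySem.Str.split? text "\n").getD []))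

-- ===== PRECONDITION & SPEC =====
def Spec_get_summary_titles (text : String) (check_points : List String) (out : List String) : Prop := out = get_summary_titles_alt text check_points
instance (text : String) (check_points : List String) (out : List String) : Decidable (Spec_get_summary_titles text check_points out) := by unfold Spec_get_summary_titles; infer_instance

-- ===== CLAIM (what is proved, stated in full; the proofs are below) =====
def Claim_equal_get_summary_titles : Prop := ∀ (text : String) (check_points : List String), Dom_get_summary_titles text check_points → Spec_get_summary_titles text check_points (get_summary_titles text check_points)

-- ===== LEMMAS AND PROOFS =====

theorem pv_findIdx?_none (cps : List String) (cont : List String)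
    (h : ∀ x ∈ cont, x ∉ cps) :
    cont.findIdx? (fun l => decide (l ∈ cps)) = none := by
  induction cont with
  | nil => rfl
  | cons a as ih =>
    simp only [List.findIdx?_cons]
    have ha : a ∉ cps := h a (by simp)
    simp [ha, ih (fun x hx => h x (by simp [hx]))]

theorem pv_findIdx?_hit (cps : List String) (cont : List String) (l : String)
    (ls : List String) (h : ∀ x ∈ cont, x ∉ cps) (hl : l ∈ cps) :
    (cont ++ l :: ls).findIdx? (fun x => decide (x ∈ cps)) = some cont.length := by
  induction cont with
  | nil => simp [List.findIdx?_cons, hl]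
  | cons a as ih =>
    have ha : a ∉ cps := h a (by simp)
    simp only [List.cons_append, List.findIdx?_cons, decide_eq_true_eq]
    simp [ha, ih (fun x hx => h x (by simp [hx]))]

theorem pv_take_hit (cont : List String) (l : String) (ls : List String) :
    (cont ++ l :: ls).take (cont.length + 1) = cont ++ [l] := by
  have : cont ++ l :: ls = (cont ++ [l]) ++ ls := by simp
  rw [this]
  have hlen : (cont ++ [l]).length = cont.length + 1 := by simp
  rw [← hlen, List.take_left]

theorem pv_drop_hit (cont : List String) (l : String) (ls : List String) :
    (cont ++ l :: ls).drop (cont.length + 1) = ls := by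
  have : cont ++ l :: ls = (cont ++ [l]) ++ ls := by simp
  rw [this]
  have hlen : (cont ++ [l]).length = cont.length + 1 := by simp
  rw [← hlen, List.drop_left]

-- the loop invariant: A's loop with pending buffer `cont` (containing no checkpoint line)
-- equals acc ++ B's loop on the remaining fuel over cont ++ lines
theorem pv_loop_eq (cps : List String) (cap : Nat) :
    ∀ (lines : List String) (c : Nat) (acc cont : List String),
      c ≤ cap → (∀ x ∈ cont, x ∉ cps) →
      pvALoop cps cap lines c acc cont = acc ++ pvBLoop cps (cap - c) (cont ++ lines) := by
  intro lines
  induction lines with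
  | nil =>
    intro c acc cont hc hcont
    simp only [pvALoop, List.append_nil]
    rcases Nat.eq_or_lt_of_le hc with h | h
    · simp [h, pvBLoop]
    · have : cap - c = (cap - c - 1) + 1 := by omega
      rw [this]
      simp [pvBLoop, pv_findIdx?_none cps cont hcont]
  | cons l ls ih =>
    intro c acc cont hc hcont
    simp only [pvALoop]
    by_cases hceq : c = cap
    · simp [hceq, pvBLoop]
    · have hlt : c < cap := lt_of_le_of_ne hc hceq
      have hfuel : cap - c = (cap - (c + 1)) + 1 := by omega
      simp only [if_neg hceq]
      by_cases hl : l ∈ cps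
      · rw [if_pos hl, ih (c + 1) _ [] hlt (by simp)]
        rw [hfuel]
        simp only [pvBLoop, pv_findIdx?_hit cps cont l ls hcont hl,
          pv_take_hit, pv_drop_hit]
        simp
      · rw [if_neg hl, ih c acc (cont ++ [l]) hc
          (by intro x hx; rcases List.mem_append.1 hx with h | h
              · exact hcont x h
              · simpa using (List.mem_singleton.1 h) ▸ hl)]
        simp

-- ===== VERDICT (by name: the statement is the Claim_ definition above) =====
theorem get_summary_titles_spec : Claim_equal_get_summary_titles := by
  intro text check_points _
  unfold Spec_get_summary_titles get_summary_titles get_summary_titles_alt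
  rw [pv_loop_eq check_points check_points.length _ 0 [] [] (Nat.zero_le _) (by simp)]
  simp
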